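-- pv_equiv track=rewrite | github.com/Yenike-RaghuRam/HomeAssignment | Coding/Python/Set1/PositiveEvenNegativeOdd.py | rearrange_pos_even_neg_odd
-- ===== SOURCE A (Python) =====
-- def rearrange_pos_even_neg_odd(arr):
--     even_idx = 0
--     odd_idx = 1
--     result = [None] * len(arr)
--     for val in arr:
--         if val > 0:
--             result[even_idx] = val
--             even_idx += 2
--         else:
--             result[odd_idx] = val
--             odd_idx += 2
--     return result
-- ===== SOURCE B (Python) =====
-- def rearrange_pos_even_neg_odd(arr):
--     positives = [v for v in arr if v > 0]
--     others = [v for v in arr if v <= 0]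
--     result = [None] * len(arr)
--     for i, v in enumerate(positives):
--         result[2 * i] = v
--     for i, v in enumerate(others):
--         result[2 * i + 1] = v
--     return result
-- ===== Notes on version B (the rewrite author's own statement) =====
-- stated objective: alternative
-- what changed: B partitions the list into positives and non-positives first, then scatters each group into even resp. odd slots of a preallocated list, instead of A's single interleaved pass with two running index counters.
import Mathlib
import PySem

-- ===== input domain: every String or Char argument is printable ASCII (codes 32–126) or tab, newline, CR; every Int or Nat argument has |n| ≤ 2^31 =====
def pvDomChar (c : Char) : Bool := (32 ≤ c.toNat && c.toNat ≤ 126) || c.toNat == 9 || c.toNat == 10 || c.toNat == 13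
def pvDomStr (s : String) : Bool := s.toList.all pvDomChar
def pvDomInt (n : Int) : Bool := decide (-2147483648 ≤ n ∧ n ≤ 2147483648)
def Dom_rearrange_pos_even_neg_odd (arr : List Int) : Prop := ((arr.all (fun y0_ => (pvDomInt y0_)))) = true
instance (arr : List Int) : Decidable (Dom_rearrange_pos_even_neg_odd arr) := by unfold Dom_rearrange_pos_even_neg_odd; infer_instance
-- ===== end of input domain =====

-- B partitions into positives/non-positives and scatters each group into even/odd slots,
-- instead of A's single interleaved pass with two running index counters (objective: alternative).


-- ===== PORT A =====
-- A's loop keeps (even_idx, odd_idx, result); result[i] = v is List.set i (some v)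
-- (inside Pre_ every index is in range, so List.set is exact there).
def rearrange_pos_even_neg_odd (arr : List Int) : List (Option Int) :=
  (arr.foldl
    (fun (st : Nat × Nat × List (Option Int)) val =>
      if val > 0 then (st.1 + 2, st.2.1, st.2.2.set st.1 (some val))
      else (st.1, st.2.1 + 2, st.2.2.set st.2.1 (some val)))
    (0, 1, List.replicate arr.length none)).2.2

-- ===== PORT B =====
def rearrange_pos_even_neg_odd_alt (arr : List Int) : List (Option Int) :=
  let positives := arr.filter (fun v => v > 0)
  let others := arr.filter (fun v => v ≤ 0)
  let result := List.replicate arr.length (none : Option Int)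
  let result := (PySem.List.enumerate positives 0).foldl
    (fun r p => r.set (2 * p.1).toNat (some p.2)) result
  (PySem.List.enumerate others 0).foldl
    (fun r p => r.set (2 * p.1 + 1).toNat (some p.2)) result

-- ===== PRECONDITION & SPEC =====
-- Pre_ excludes exactly the inputs on which Python A raises IndexError (a positive beyond
-- slot n-1, i.e. more than ⌈n/2⌉ positives, or a non-positive beyond slot n-1, i.e. more
-- than ⌊n/2⌋ non-positives); Python B raises IndexError on the same inputs.
def Pre_rearrange_pos_even_neg_odd (arr : List Int) : Prop :=
  2 * (arr.countP (fun v => decide (v > 0))) ≤ arr.length + 1 ∧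
  2 * (arr.countP (fun v => decide (v ≤ 0))) ≤ arr.length
instance (arr : List Int) : Decidable (Pre_rearrange_pos_even_neg_odd arr) := by
  unfold Pre_rearrange_pos_even_neg_odd; infer_instance
def pvWitness_rearrange_pos_even_neg_odd : List Int := [3, -1, 5, 0, 7]
def Spec_rearrange_pos_even_neg_odd (arr : List Int) (out : List (Option Int)) : Prop := out = rearrange_pos_even_neg_odd_alt arr
instance (arr : List Int) (out : List (Option Int)) : Decidable (Spec_rearrange_pos_even_neg_odd arr out) := by unfold Spec_rearrange_pos_even_neg_odd; infer_instance

-- ===== CLAIM (what is proved, stated in full; the proofs are below) =====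
def Claim_equal_rearrange_pos_even_neg_odd : Prop := ∀ (arr : List Int), Dom_rearrange_pos_even_neg_odd arr → Pre_rearrange_pos_even_neg_odd arr → Spec_rearrange_pos_even_neg_odd arr (rearrange_pos_even_neg_odd arr)

-- ===== LEMMAS AND PROOFS =====

-- scatter of a group: place xs at indices 2a, 2a+2, … (resp. 2b+1, 2b+3, …)
def scatP : List Int → Nat → List (Option Int) → List (Option Int)
  | [], _, r => r
  | v :: t, a, r => scatP t (a + 1) (r.set (2 * a) (some v))

def scatO : List Int → Nat → List (Option Int) → List (Option Int)
  | [], _, r => r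
  | v :: t, b, r => scatO t (b + 1) (r.set (2 * b + 1) (some v))

-- B's enumerate-folds compute the scatters
theorem foldP_eq_scatP (xs : List Int) (a : Nat) (r : List (Option Int)) :
    (PySem.List.enumerate xs (a : Int)).foldl (fun r p => r.set (2 * p.1).toNat (some p.2)) r
      = scatP xs a r := by
  induction xs generalizing a r with
  | nil => simp [PySem.List.enumerate_nil, scatP]
  | cons v t ih =>
    rw [PySem.List.enumerate_cons]
    simp only [List.foldl_cons]
    have h : ((2 * (a : Int)).toNat) = 2 * a := by omega
    rw [scatP, h]
    have := ih (a + 1) (r.set (2 * a) (some v))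
    simpa using this

theorem foldO_eq_scatO (xs : List Int) (b : Nat) (r : List (Option Int)) :
    (PySem.List.enumerate xs (b : Int)).foldl (fun r p => r.set (2 * p.1 + 1).toNat (some p.2)) r
      = scatO xs b r := by
  induction xs generalizing b r with
  | nil => simp [PySem.List.enumerate_nil, scatO]
  | cons v t ih =>
    rw [PySem.List.enumerate_cons]
    simp only [List.foldl_cons]
    have h : ((2 * (b : Int) + 1).toNat) = 2 * b + 1 := by omega
    rw [scatO, h]
    have := ih (b + 1) (r.set (2 * b + 1) (some v))
    simpa using this

-- an odd-index set commutes past scatP (which only touches even indices)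
theorem scatP_set_odd (xs : List Int) (a j : Nat) (hj : j % 2 = 1) (v : Option Int)
    (r : List (Option Int)) :
    scatP xs a (r.set j v) = (scatP xs a r).set j v := by
  induction xs generalizing a r with
  | nil => rfl
  | cons w t ih =>
    rw [scatP, scatP, List.set_comm _ _ (by omega : j ≠ 2 * a), ih]

-- A's interleaved fold, from state (2a, 2b+1, r), equals B's split-then-scatter
theorem foldA_eq (arr : List Int) (a b : Nat) (r : List (Option Int)) :
    (arr.foldl
      (fun (st : Nat × Nat × List (Option Int)) val =>
        if val > 0 then (st.1 + 2, st.2.1, st.2.2.set st.1 (some val))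
        else (st.1, st.2.1 + 2, st.2.2.set st.2.1 (some val)))
      (2 * a, 2 * b + 1, r)).2.2
      = scatO (arr.filter (fun v => v ≤ 0)) b (scatP (arr.filter (fun v => v > 0)) a r) := by
  induction arr generalizing a b r with
  | nil => rfl
  | cons v t ih =>
    by_cases hv : v > 0
    · have h1 : ¬ (v ≤ 0) := by omega
      simp only [List.foldl_cons, List.filter_cons, decide_eq_true_eq, hv, h1, if_true, if_false]
      have he : 2 * a + 2 = 2 * (a + 1) := by ring
      rw [he, ih (a + 1) b (r.set (2 * a) (some v)), scatP]
    · have h1 : v ≤ 0 := by omega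
      simp only [List.foldl_cons, List.filter_cons, decide_eq_true_eq, hv, h1, if_true, if_false]
      have he : 2 * b + 1 + 2 = 2 * (b + 1) + 1 := by ring
      rw [he, ih a (b + 1) (r.set (2 * b + 1) (some v)), scatO,
        scatP_set_odd _ _ _ (by omega)]

-- ===== VERDICT (by name: the statement is the Claim_ definition above) =====
theorem rearrange_pos_even_neg_odd_spec : Claim_equal_rearrange_pos_even_neg_odd := by
  intro arr _ _
  unfold Spec_rearrange_pos_even_neg_odd rearrange_pos_even_neg_odd rearrange_pos_even_neg_odd_alt
  have h0 : (0 : Int) = ((0 : Nat) : Int) := rfl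
  simp only [h0, foldP_eq_scatP, foldO_eq_scatO]
  have := foldA_eq arr 0 0 (List.replicate arr.length none)
  simpa using this
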